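-- pv_equiv track=rewrite | github.com/minaolenpavel/Linguistique-Corpus-Inalco | S2/automates/0_automate_minimizer.py | etats_equiv
-- ===== SOURCE A (Python) =====
-- alphabet_lexique = ['le', 'petit', 'chateau']
--
-- les_transitions = {'S': {'le':'D'}, 'D': {'petit':'A', 'château':'E1'}, 'A': {'petit': 'A', 'château': 'E2'} }
--
-- def etats_equiv( G  ):
--      new_g_lst =  []
--      for a in alphabet_lexique:
--           new_g  = []
--           for e0 in G:
--               if e0 in les_transitions.keys():
--                    if a in les_transitions[ e0 ].keys():
--                         (a, trgt_e0 ) = [ (k,v) for (k,v) in les_transitions[ e0 ].items() if k==a ][0]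
--                         eqv_found = False
--                         for e1 in G:
--                              if (e0 != e1) and (e1 in les_transitions.keys()):
--                                   if a in les_transitions[ e1 ].keys():
--                                        (a, trgt_e1 ) = [ (k,v) for (k,v) in les_transitions[ e1 ].items() if k==a ][0]
--                                        if trgt_e0 == trgt_e1:
--                                             if e0 not in new_g:
--                                                  new_g.append( e0 )
--                                             if e1 not in new_g:
--                                                  new_g.append( e1 )
--                                             eqv_found = True
--                         if not eqv_found:
--                              if e0 not in new_g:
--                                   new_g.append( e0 )
--
--           if new_g:
--                new_g_lst.append( new_g )
--      return new_g_lst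
-- ===== SOURCE B (Python) =====
-- alphabet_lexique = ['le', 'petit', 'chateau']
--
-- les_transitions = {'S': {'le':'D'}, 'D': {'petit':'A', 'château':'E1'}, 'A': {'petit': 'A', 'château': 'E2'} }
--
-- def etats_equiv(G):
--     new_g_lst = []
--     for a in alphabet_lexique:
--         groups = {}  # transition target -> states of G reaching it on a, first-occurrence order
--         for e in G:
--             t = les_transitions.get(e, {}).get(a)
--             if t is not None:
--                 grp = groups.setdefault(t, [])
--                 if e not in grp:
--                     grp.append(e)
--         new_g = [s for grp in groups.values() for s in grp]
--         if new_g: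
--             new_g_lst.append(new_g)
--     return new_g_lst
-- ===== Notes on version B (the rewrite author's own statement) =====
-- stated objective: alternative
-- what changed: Replaces A's nested scan over state pairs (for each state, rescanning G for partners with the same transition target) with a single pass per symbol that groups states by transition target in a dict and flattens the groups in first-occurrence order.
import Mathlib
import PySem

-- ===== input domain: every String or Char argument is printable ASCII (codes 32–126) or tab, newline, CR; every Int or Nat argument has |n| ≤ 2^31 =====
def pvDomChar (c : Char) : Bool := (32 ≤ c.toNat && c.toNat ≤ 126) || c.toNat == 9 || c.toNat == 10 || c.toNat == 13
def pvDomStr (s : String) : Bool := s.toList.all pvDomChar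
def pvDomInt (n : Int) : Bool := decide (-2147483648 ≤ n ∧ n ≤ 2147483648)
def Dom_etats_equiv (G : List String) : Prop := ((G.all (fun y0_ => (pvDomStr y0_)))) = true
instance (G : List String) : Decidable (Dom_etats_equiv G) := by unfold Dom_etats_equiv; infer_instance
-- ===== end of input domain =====

-- B builds, per symbol, a dict grouping states by transition target in one pass, instead of A's nested rescan of G for equivalent partners per state (alternative algorithm, same return value).


-- ===== PORT A =====
def alphabetLexique : List String := ["le", "petit", "chateau"]

def lesTransitions : PySem.Dict String (PySem.Dict String String) :=
  PySem.Dict.mk [("S", PySem.Dict.mk [("le", "D")]),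
                 ("D", PySem.Dict.mk [("petit", "A"), ("château", "E1")]),
                 ("A", PySem.Dict.mk [("petit", "A"), ("château", "E2")])]

/-- `if x not in l: l.append(x)` -/
def pyAppend (l : List String) (x : String) : List String :=
  if l.contains x then l else l ++ [x]

/-- inner `for e1 in G:` loop body of A (state: (new_g, eqv_found)). -/
def innerA (a e0 t0 : String) (st : List String × Bool) (e1 : String) : List String × Bool :=
  if e0 ≠ e1 then
    match lesTransitions.get? e1 with
    | none => st
    | some te1 =>
      match te1.get? a with
      | none => st
      | some t1 =>
        if t0 = t1 then (pyAppend (pyAppend st.1 e0) e1, true) else st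
  else st

/-- `for e0 in G:` loop body of A. -/
def stepA (a : String) (G : List String) (new_g : List String) (e0 : String) : List String :=
  match lesTransitions.get? e0 with
  | none => new_g
  | some te0 =>
    match te0.get? a with
    | none => new_g
    | some t0 =>
      let st := G.foldl (innerA a e0 t0) (new_g, false)
      if st.2 then st.1 else pyAppend st.1 e0

def etats_equiv (G : List String) : List (List String) :=
  alphabetLexique.foldl (fun new_g_lst a =>
    let new_g := G.foldl (stepA a G) []
    if new_g ≠ [] then new_g_lst ++ [new_g] else new_g_lst) []

-- ===== PORT B =====
/-- `for e in G:` loop body of B: file `e` under its transition target on `a`. -/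
def stepB (a : String) (d : PySem.Dict String (List String)) (e : String) : PySem.Dict String (List String) :=
  match (lesTransitions.getD e PySem.Dict.empty).get? a with
  | none => d
  | some t =>
    let grp := d.getD t []
    if grp.contains e then d else d.insert t (grp ++ [e])

def etats_equiv_alt (G : List String) : List (List String) :=
  alphabetLexique.foldl (fun new_g_lst a =>
    let new_g := ((G.foldl (stepB a) PySem.Dict.empty).values).flatten
    if new_g ≠ [] then new_g_lst ++ [new_g] else new_g_lst) []

-- ===== PRECONDITION & SPEC =====
def Spec_etats_equiv (G : List String) (out : List (List String)) : Prop := out = etats_equiv_alt G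
instance (G : List String) (out : List (List String)) : Decidable (Spec_etats_equiv G out) := by unfold Spec_etats_equiv; infer_instance

-- ===== CLAIM (what is proved, stated in full; the proofs are below) =====
def Claim_equal_etats_equiv : Prop := ∀ (G : List String), Dom_etats_equiv G → Spec_etats_equiv G (etats_equiv G)

-- ===== LEMMAS AND PROOFS =====

/-- the transition looked up by both programs: target of state `e` on symbol `a`. -/
def fA (a e : String) : Option String := (lesTransitions.get? e).bind (fun d => d.get? a)

def memA (a e : String) : Bool := (fA a e).isSome

/-- `e1` is an equivalent partner of `e0` on symbol `a` in A's inner scan (single-target case). -/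
def matesP (a e0 e1 : String) : Bool := decide (e0 ≠ e1) && memA a e1

/-- canonical per-symbol result: states with a transition on `a`, first occurrences kept. -/
def ded (a : String) (G : List String) : List String :=
  (G.filter (fun e => memA a e)).foldl pyAppend []

lemma pyAppend_of_mem {l : List String} {x : String} (h : x ∈ l) : pyAppend l x = l := by
  simp [pyAppend, h]

lemma mem_pyAppend {l : List String} {x y : String} : y ∈ pyAppend l x ↔ y ∈ l ∨ y = x := by
  by_cases h : x ∈ l
  · simp only [pyAppend_of_mem h]
    exact ⟨Or.inl, fun hy => hy.elim id (fun e => e ▸ h)⟩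
  · simp [pyAppend, h]

lemma mem_foldl_pyAppend (L : List String) : ∀ (l : List String) (y : String),
    y ∈ L.foldl pyAppend l ↔ y ∈ l ∨ y ∈ L := by
  induction L with
  | nil => simp
  | cons x L ih =>
    intro l y
    simp only [List.foldl_cons, ih, mem_pyAppend, List.mem_cons]
    tauto

lemma foldl_pyAppend_of_subset {L l : List String} (h : ∀ x ∈ L, x ∈ l) :
    L.foldl pyAppend l = l := by
  induction L with
  | nil => rfl
  | cons x L ih =>
    simp only [List.foldl_cons, pyAppend_of_mem (h x (by simp))]
    exact ih fun y hy => h y (by simp [hy])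

lemma foldl_pyAppend_filter_ne {x : String} (L : List String) :
    ∀ {l : List String}, x ∈ l →
      (L.filter (fun y => x ≠ y)).foldl pyAppend l = L.foldl pyAppend l := by
  induction L with
  | nil => intro l _; rfl
  | cons y L ih =>
    intro l h
    by_cases hxy : x = y
    · subst hxy
      rw [List.filter_cons_of_neg (by simp), List.foldl_cons, pyAppend_of_mem h]
      exact ih h
    · rw [List.filter_cons_of_pos (by simp [hxy]), List.foldl_cons, List.foldl_cons]
      exact ih (mem_pyAppend.mpr (Or.inl h))

/-- conditional fold = fold over filter. -/
lemma foldl_ite_filter {α β : Type} (c : β → Bool) (f : α → β → α) (L : List β) :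
    ∀ (s : α), L.foldl (fun s x => if c x then f s x else s) s = (L.filter c).foldl f s := by
  induction L with
  | nil => intro s; rfl
  | cons x L ih =>
    intro s
    by_cases h : c x <;> simp [h, ih]

lemma innerA_eq {a t₀ : String} (H : ∀ e t, fA a e = some t → t = t₀)
    (e0 : String) (st : List String × Bool) (e1 : String) :
    innerA a e0 t₀ st e1 =
      if matesP a e0 e1 then (pyAppend (pyAppend st.1 e0) e1, true) else st := by
  unfold innerA matesP memA
  by_cases hne : e0 ≠ e1
  · cases h1 : lesTransitions.get? e1 with
    | none => simp [hne, fA, h1]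
    | some te1 =>
      cases h2 : te1.get? a with
      | none => simp [hne, fA, h1, h2]
      | some t1 =>
        have ht : t1 = t₀ := H e1 t1 (by simp [fA, h1, h2])
        simp [hne, fA, h1, h2, ht]
  · simp [hne]

lemma foldl_innerA {a t₀ : String} (H : ∀ e t, fA a e = some t → t = t₀)
    (e0 : String) (L : List String) :
    ∀ (st : List String × Bool),
      L.foldl (innerA a e0 t₀) st =
        (L.foldl (fun ng e1 => if matesP a e0 e1 then pyAppend (pyAppend ng e0) e1 else ng) st.1,
         st.2 || L.any (matesP a e0)) := by
  induction L with
  | nil => intro st; simp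
  | cons x L ih =>
    intro st
    rw [List.foldl_cons, innerA_eq H]
    by_cases hc : matesP a e0 x = true
    · rw [if_pos hc, ih]
      simp [hc]
    · rw [if_neg hc, ih]
      simp only [Bool.not_eq_true] at hc
      simp [hc]

lemma foldl_dbl_of_mem {e0 : String} (L : List String) :
    ∀ {ng : List String}, e0 ∈ ng →
      L.foldl (fun ng e1 => pyAppend (pyAppend ng e0) e1) ng = L.foldl pyAppend ng := by
  induction L with
  | nil => intro ng _; rfl
  | cons x L ih =>
    intro ng h
    rw [List.foldl_cons, List.foldl_cons, pyAppend_of_mem h]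
    exact ih (mem_pyAppend.mpr (Or.inl h))

lemma stepA_of_not_mem {a : String} (G : List String) (ng : List String) (e0 : String)
    (h : memA a e0 = false) : stepA a G ng e0 = ng := by
  cases h1 : lesTransitions.get? e0 with
  | none => simp only [stepA, h1]
  | some te0 =>
    cases h2 : te0.get? a with
    | none => simp only [stepA, h1, h2]
    | some t0 =>
      exfalso
      simp [memA, fA, h1, h2] at h

lemma stepA_of_mem {a t₀ : String} (H : ∀ e t, fA a e = some t → t = t₀)
    (G : List String) (ng : List String) (e0 : String) (h : memA a e0 = true) :
    stepA a G ng e0 =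
      match G.filter (matesP a e0) with
      | [] => pyAppend ng e0
      | x :: rest => rest.foldl pyAppend (pyAppend (pyAppend ng e0) x) := by
  cases h1 : lesTransitions.get? e0 with
  | none => exfalso; simp [memA, fA, h1] at h
  | some te0 =>
    cases h2 : te0.get? a with
    | none => exfalso; simp [memA, fA, h1, h2] at h
    | some t =>
      have ht0 : t = t₀ := H e0 t (by simp [fA, h1, h2])
      subst ht0
      simp only [stepA, h1, h2]
      rw [foldl_innerA H e0 G ((ng, false))]
      rw [foldl_ite_filter (matesP a e0) (fun ng e1 => pyAppend (pyAppend ng e0) e1) G]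
      cases hm : G.filter (matesP a e0) with
      | nil =>
        have hany : G.any (matesP a e0) = false := by
          rw [List.any_eq_false]
          intro x hx
          have hx2 := List.filter_eq_nil_iff.mp hm x hx
          simpa using hx2
        simp [hany]
      | cons x rest =>
        have hany : G.any (matesP a e0) = true := by
          have hx : x ∈ G.filter (matesP a e0) := by rw [hm]; simp
          rw [List.mem_filter] at hx
          exact List.any_eq_true.mpr ⟨x, hx.1, hx.2⟩
        simp [hany]
        exact foldl_dbl_of_mem rest (mem_pyAppend.mpr (Or.inl (mem_pyAppend.mpr (Or.inr rfl))))

lemma ded_mem {a : String} {G : List String} {y : String}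
    (hy : y ∈ G) (hm : memA a y = true) : y ∈ ded a G := by
  unfold ded
  rw [mem_foldl_pyAppend]
  exact Or.inr (List.mem_filter.mpr ⟨hy, hm⟩)

lemma outerA {a t₀ : String} (H : ∀ e t, fA a e = some t → t = t₀) (G : List String) :
    ∀ (S P : List String), G = P ++ S →
      S.foldl (stepA a G) (if P.filter (fun e => memA a e) = [] then [] else ded a G) = ded a G := by
  intro S
  induction S with
  | nil =>
    intro P hG
    rw [List.foldl_nil]
    by_cases hP : P.filter (fun e => memA a e) = []
    · rw [if_pos hP]
      have hGf : G.filter (fun e => memA a e) = [] := by rw [hG, List.append_nil]; exact hP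
      simp [ded, hGf]
    · rw [if_neg hP]
  | cons e0 S' ih =>
    intro P hG
    rw [List.foldl_cons]
    have hG' : G = (P ++ [e0]) ++ S' := by rw [hG]; simp
    have h00 : pyAppend [] e0 = [e0] := by simp [pyAppend]
    have key : stepA a G (if P.filter (fun e => memA a e) = [] then [] else ded a G) e0 =
        (if (P ++ [e0]).filter (fun e => memA a e) = [] then [] else ded a G) := by
      by_cases hme : memA a e0 = true
      · have hne2 : (P ++ [e0]).filter (fun e => memA a e) ≠ [] := by
          simp [List.filter_append, hme]
        rw [if_neg hne2]
        have he0G : e0 ∈ G := by rw [hG]; simp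
        have he0d : e0 ∈ ded a G := ded_mem he0G hme
        by_cases hP : P.filter (fun e => memA a e) = []
        · rw [if_pos hP, stepA_of_mem H G [] e0 hme]
          have hGf : G.filter (fun e => memA a e) = e0 :: S'.filter (fun e => memA a e) := by
            rw [hG, List.filter_append, hP, List.nil_append, List.filter_cons, if_pos hme]
          have hmates : G.filter (matesP a e0) =
              (S'.filter (fun e => memA a e)).filter (fun y => e0 ≠ y) := by
            have h1 : G.filter (matesP a e0) =
                (G.filter (fun e => memA a e)).filter (fun y => e0 ≠ y) := by
              rw [List.filter_filter]
              apply List.filter_congr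
              intro x _
              simp [matesP, Bool.and_comm]
            rw [h1, hGf, List.filter_cons_of_neg (by simp)]
          have hded : ded a G = (S'.filter (fun e => memA a e)).foldl pyAppend [e0] := by
            unfold ded
            rw [hGf, List.foldl_cons, h00]
          cases hm : G.filter (matesP a e0) with
          | nil =>
            show pyAppend [] e0 = ded a G
            have hall : ∀ y ∈ S'.filter (fun e => memA a e), y = e0 := by
              intro y hy
              by_contra hne'
              have hmem : y ∈ G.filter (matesP a e0) := by
                rw [hmates]
                exact List.mem_filter.mpr ⟨hy, by simp [Ne.symm hne']⟩
              rw [hm] at hmem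
              simp at hmem
            rw [h00, hded, foldl_pyAppend_of_subset (by intro y hy; simp [hall y hy])]
          | cons x rest =>
            show rest.foldl pyAppend (pyAppend (pyAppend [] e0) x) = ded a G
            rw [h00, hded,
                ← foldl_pyAppend_filter_ne (x := e0) (l := [e0])
                    (S'.filter (fun e => memA a e)) (by simp),
                ← hmates, hm, List.foldl_cons]
        · rw [if_neg hP, stepA_of_mem H G (ded a G) e0 hme]
          have hsub : ∀ y ∈ G.filter (matesP a e0), y ∈ ded a G := by
            intro y hy
            rw [List.mem_filter] at hy
            have hy2 := hy.2
            simp [matesP] at hy2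
            exact ded_mem hy.1 hy2.2
          cases hm : G.filter (matesP a e0) with
          | nil =>
            show pyAppend (ded a G) e0 = ded a G
            exact pyAppend_of_mem he0d
          | cons x rest =>
            show rest.foldl pyAppend (pyAppend (pyAppend (ded a G) e0) x) = ded a G
            have hx : x ∈ ded a G := hsub x (by rw [hm]; simp)
            rw [pyAppend_of_mem he0d, pyAppend_of_mem hx]
            exact foldl_pyAppend_of_subset (fun y hy => hsub y (by rw [hm]; simp [hy]))
      · simp only [Bool.not_eq_true] at hme
        rw [stepA_of_not_mem G _ e0 hme]
        have hf2 : (P ++ [e0]).filter (fun e => memA a e) = P.filter (fun e => memA a e) := by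
          simp [List.filter_append, hme]
        rw [hf2]
    rw [key]
    exact ih (P ++ [e0]) hG'

lemma innerFoldA_eq {a t₀ : String} (H : ∀ e t, fA a e = some t → t = t₀) (G : List String) :
    G.foldl (stepA a G) [] = ded a G := by
  have := outerA H G G [] rfl
  simpa using this

-- B side --

lemma getD_get?_eq_fA (a e : String) :
    (lesTransitions.getD e PySem.Dict.empty).get? a = fA a e := by
  rw [PySem.Dict.getD_eq_get?_getD, fA]
  cases h : lesTransitions.get? e with
  | none => simp [PySem.Dict.get?_empty]
  | some te => simp

/-- B's dict after processing some states, in the single-target case: one group under `t₀`. -/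
def canonD (t₀ : String) (g : List String) : PySem.Dict String (List String) :=
  if g = [] then PySem.Dict.empty else PySem.Dict.mk [(t₀, g)]

lemma getD_canonD (t₀ : String) (g : List String) : (canonD t₀ g).getD t₀ [] = g := by
  unfold canonD
  by_cases hg : g = []
  · simp [hg, PySem.Dict.getD_empty]
  · rw [if_neg hg, PySem.Dict.getD_eq_get?_getD, PySem.Dict.get?_mk_cons]
    simp

lemma stepB_canon {a t₀ : String} (H : ∀ e t, fA a e = some t → t = t₀)
    (e : String) (g : List String) :
    stepB a (canonD t₀ g) e = canonD t₀ (if memA a e then pyAppend g e else g) := by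
  unfold stepB
  rw [getD_get?_eq_fA]
  cases hf : fA a e with
  | none => simp [memA, hf]
  | some t =>
    have ht : t = t₀ := H e t hf
    subst ht
    have hme : memA a e = true := by simp [memA, hf]
    rw [if_pos hme]
    simp only [getD_canonD]
    by_cases he : e ∈ g
    · rw [if_pos (List.contains_iff_mem.mpr he), pyAppend_of_mem he]
    · rw [if_neg (by simpa using he)]
      have hap : pyAppend g e = g ++ [e] := by simp [pyAppend, he]
      rw [hap]
      unfold canonD
      by_cases hg : g = []
      · subst hg
        rw [if_pos rfl, if_neg (by simp)]
        rfl
      · rw [if_neg hg, if_neg (by simp)]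
        apply PySem.Dict.ext
        rw [PySem.Dict.items_insert]
        simp

lemma foldB {a t₀ : String} (H : ∀ e t, fA a e = some t → t = t₀) (L : List String) :
    ∀ (g : List String),
      L.foldl (stepB a) (canonD t₀ g) =
        canonD t₀ (L.foldl (fun g e => if memA a e then pyAppend g e else g) g) := by
  induction L with
  | nil => intro g; rfl
  | cons e L ih =>
    intro g
    rw [List.foldl_cons, stepB_canon H, List.foldl_cons]
    exact ih _

lemma innerFoldB_eq {a t₀ : String} (H : ∀ e t, fA a e = some t → t = t₀) (G : List String) :
    ((G.foldl (stepB a) PySem.Dict.empty).values).flatten = ded a G := by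
  have h0 : (PySem.Dict.empty : PySem.Dict String (List String)) = canonD t₀ [] := by
    simp [canonD]
  rw [h0, foldB H, foldl_ite_filter (fun e => memA a e) pyAppend G]
  show (canonD t₀ (ded a G)).values.flatten = ded a G
  unfold canonD
  by_cases hd : ded a G = [] <;> simp [hd, PySem.Dict.empty]

lemma H_le : ∀ e t, fA "le" e = some t → t = "D" := by
  intro e t h
  unfold fA lesTransitions at h
  simp only [PySem.Dict.get?_mk_cons] at h
  split_ifs at h <;> simp_all [PySem.Dict.get?]

lemma H_petit : ∀ e t, fA "petit" e = some t → t = "A" := by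
  intro e t h
  unfold fA lesTransitions at h
  simp only [PySem.Dict.get?_mk_cons] at h
  split_ifs at h <;> simp_all [PySem.Dict.get?]

lemma H_chateau : ∀ e t, fA "chateau" e = some t → t = "A" := by
  intro e t h
  unfold fA lesTransitions at h
  simp only [PySem.Dict.get?_mk_cons] at h
  split_ifs at h <;> simp_all [PySem.Dict.get?]

lemma main_eq (G : List String) : etats_equiv G = etats_equiv_alt G := by
  unfold etats_equiv etats_equiv_alt alphabetLexique
  simp only [List.foldl_cons, List.foldl_nil]
  rw [innerFoldA_eq H_le G, innerFoldA_eq H_petit G, innerFoldA_eq H_chateau G,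
      innerFoldB_eq H_le G, innerFoldB_eq H_petit G, innerFoldB_eq H_chateau G]

-- ===== VERDICT (by name: the statement is the Claim_ definition above) =====
theorem etats_equiv_spec : Claim_equal_etats_equiv := by
  intro G _
  unfold Spec_etats_equiv
  exact main_eq G
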